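-- pv_equiv track=rewrite | github.com/Brian-JT/chess_interface | atheris_v01.py | index_column
-- ===== SOURCE A (Python) =====
-- def index_column(index: int) -> str:
--     """turns a board index into a letter for that column on the chess board"""
--     columns = "abcdefgh"
--     count = 0
--     for column in columns:
--         if count == index:
--             return column
--         count += 1
--     return "a"
-- ===== SOURCE B (Python) =====
-- def index_column(index: int) -> str:
--     """turns a board index into a letter for that column on the chess board"""
--     return "abcdefgh"[index] if 0 <= index < 8 else "a"
-- ===== Notes on version B (the rewrite author's own statement) =====
-- stated objective: simpler
-- what changed: Replaces the counting scan over the column string with direct string indexing guarded by an explicit 0 <= index < 8 bounds check falling back to "a".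
import Mathlib
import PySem

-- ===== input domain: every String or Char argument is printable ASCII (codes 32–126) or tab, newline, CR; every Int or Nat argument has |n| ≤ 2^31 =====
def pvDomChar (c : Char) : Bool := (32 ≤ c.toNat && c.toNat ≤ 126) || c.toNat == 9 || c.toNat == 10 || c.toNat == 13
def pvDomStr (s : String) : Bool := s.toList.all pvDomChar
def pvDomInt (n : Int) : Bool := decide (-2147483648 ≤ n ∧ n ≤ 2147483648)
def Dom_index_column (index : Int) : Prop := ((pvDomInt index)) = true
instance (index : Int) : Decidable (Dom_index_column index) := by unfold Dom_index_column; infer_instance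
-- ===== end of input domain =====

-- B changes: direct guarded indexing instead of A's counting scan; objective: simpler.

-- ===== PORT A =====
-- the for-loop over the letters with the running counter, as structural recursion
def indexColumnLoop : List Char → Int → Int → String
  | [], _, _ => "a"
  | c :: cs, count, index =>
      if count = index then String.ofList [c] else indexColumnLoop cs (count + 1) index

def index_column (index : Int) : String :=
  indexColumnLoop "abcdefgh".toList 0 index

-- ===== PORT B =====
def index_column_alt (index : Int) : String :=
  if 0 ≤ index ∧ index < 8 then
    match PySem.Str.pyGet? "abcdefgh" index with
    | some c => String.ofList [c]
    | none => "a"  -- unreachable under the guard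
  else "a"

-- ===== PRECONDITION & SPEC =====
def Spec_index_column (index : Int) (out : String) : Prop := out = index_column_alt index
instance (index : Int) (out : String) : Decidable (Spec_index_column index out) := by unfold Spec_index_column; infer_instance

-- ===== CLAIM (what is proved, stated in full; the proofs are below) =====
def Claim_equal_index_column : Prop := ∀ (index : Int), Dom_index_column index → Spec_index_column index (index_column index)

-- ===== LEMMAS AND PROOFS =====
theorem loop_miss (index : Int) (h : ¬ (0 ≤ index ∧ index < 8)) :
    index_column index = "a" := by
  unfold index_column
  rw [show "abcdefgh".toList = ['a','b','c','d','e','f','g','h'] from rfl]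
  simp [indexColumnLoop,
    show ¬((0:Int) = index) by omega, show ¬((1:Int) = index) by omega,
    show ¬((2:Int) = index) by omega, show ¬((3:Int) = index) by omega,
    show ¬((4:Int) = index) by omega, show ¬((5:Int) = index) by omega,
    show ¬((6:Int) = index) by omega, show ¬((7:Int) = index) by omega]

-- ===== VERDICT (by name: the statement is the Claim_ definition above) =====
theorem index_column_spec : Claim_equal_index_column := by
  intro index _
  unfold Spec_index_column
  by_cases h : 0 ≤ index ∧ index < 8
  · obtain ⟨h1, h2⟩ := h
    interval_cases index <;> decide
  · rw [loop_miss index h]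
    simp [index_column_alt, h]
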